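-- pv_equiv track=rewrite | github.com/XtraBros/embodied-ai-edu | booster_ros2_example/rtc_client/src/llm_web_test.py | sanitize_tts_text
-- ===== SOURCE A (Python) =====
-- def sanitize_tts_text(text):
--     if not isinstance(text, str) or not text:
--         return ""
--     out = []
--     in_asterisk = False
--     for ch in text:
--         if ch == "*":
--             in_asterisk = not in_asterisk
--             continue
--         if not in_asterisk:
--             out.append(ch)
--     cleaned = "".join(out).strip()
--     return cleaned
-- ===== SOURCE B (Python) =====
-- def sanitize_tts_text(text):
--     if not isinstance(text, str) or not text:
--         return ""
--     segments = text.split("*")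
--     return "".join(segments[::2]).strip()
-- ===== Notes on version B (the rewrite author's own statement) =====
-- stated objective: faster
-- what changed: Replaces the per-character toggle state machine with a single split on the asterisk separator followed by selecting the even-indexed segments (the spans outside asterisk pairs) and joining them.
import Mathlib
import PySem

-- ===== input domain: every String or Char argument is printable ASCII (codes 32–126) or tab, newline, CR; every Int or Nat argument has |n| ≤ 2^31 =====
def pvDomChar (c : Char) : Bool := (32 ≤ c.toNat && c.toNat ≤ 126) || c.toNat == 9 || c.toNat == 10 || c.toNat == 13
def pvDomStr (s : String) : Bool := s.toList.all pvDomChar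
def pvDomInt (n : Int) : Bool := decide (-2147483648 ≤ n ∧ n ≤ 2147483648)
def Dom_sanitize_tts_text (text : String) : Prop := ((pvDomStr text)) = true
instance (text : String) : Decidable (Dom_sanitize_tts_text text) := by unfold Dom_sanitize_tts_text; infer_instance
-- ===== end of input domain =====

-- B replaces A's per-character toggle state machine with one split + keep even-indexed segments + join + strip (faster: C-level str.split instead of a Python char loop).


-- ===== PORT A =====
def sanitize_tts_text (text : String) : String :=
  if text = "" then ""
  else
    let st := text.toList.foldl
      (fun (st : List Char × Bool) ch =>
        if ch = '*' then (st.1, !st.2)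
        else if !st.2 then (st.1 ++ [ch], st.2) else st)
      ([], false)
    PySem.Str.strip (String.ofList st.1)

-- ===== PORT B =====
def sanitize_tts_text_alt (text : String) : String :=
  if text = "" then ""
  else
    let segments := (PySem.Str.split? text "*").getD []
    PySem.Str.strip (PySem.Str.join "" ((PySem.List.slice? segments none none 2).getD []))

-- ===== PRECONDITION & SPEC =====
def Spec_sanitize_tts_text (text : String) (out : String) : Prop := out = sanitize_tts_text_alt text
instance (text : String) (out : String) : Decidable (Spec_sanitize_tts_text text out) := by unfold Spec_sanitize_tts_text; infer_instance

-- ===== CLAIM (what is proved, stated in full; the proofs are below) =====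
def Claim_equal_sanitize_tts_text : Prop := ∀ (text : String), Dom_sanitize_tts_text text → Spec_sanitize_tts_text text (sanitize_tts_text text)

-- ===== LEMMAS AND PROOFS =====

-- split on a single '*', matching Python str.split("*")
def pvSplit1 : List Char → List (List Char)
  | [] => [[]]
  | c :: rest =>
    if c = '*' then [] :: pvSplit1 rest
    else match pvSplit1 rest with
         | [] => [[c]]
         | h :: t => (c :: h) :: t

-- every other element starting at index 0 / 1
mutual
def pvEvens {α : Type} : List α → List α
  | [] => []
  | x :: l => x :: pvOdds l
def pvOdds {α : Type} : List α → List α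
  | [] => []
  | _ :: l => pvEvens l
end

-- A's toggle filter as a plain recursion
def pvKeep : Bool → List Char → List Char
  | _, [] => []
  | b, c :: t => if c = '*' then pvKeep (!b) t else if !b then c :: pvKeep b t else pvKeep b t

theorem pvSplit1_ne_nil (cs : List Char) : pvSplit1 cs ≠ [] := by
  induction cs with
  | nil => simp [pvSplit1]
  | cons c rest _ =>
    simp only [pvSplit1]
    split_ifs
    · simp
    · cases h : pvSplit1 rest <;> simp

theorem pvGo_spec (fuel : Nat) : ∀ (l cur : List Char) (accs : List (List Char)),
    l.length < fuel →
    PySem.Chars.splitOn.go ['*'] fuel l cur accs =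
      accs.reverse ++ (match pvSplit1 l with
                       | [] => [cur.reverse]
                       | h :: t => (cur.reverse ++ h) :: t) := by
  induction fuel with
  | zero => intro l cur accs h; omega
  | succ f ih =>
    intro l cur accs h
    cases l with
    | nil => simp [PySem.Chars.splitOn.go, pvSplit1]
    | cons c rest =>
      rw [PySem.Chars.splitOn.go]
      by_cases hc : c = '*'
      · subst hc
        simp only [List.isPrefixOf, BEq.rfl, Bool.true_and, if_true]
        simp only [List.length_cons, List.length_nil, List.drop_succ_cons, List.drop_zero]
        rw [ih rest [] (cur.reverse :: accs) (by simpa using Nat.lt_of_succ_lt_succ h)]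
        cases hs : pvSplit1 rest with
        | nil => exact absurd hs (pvSplit1_ne_nil rest)
        | cons h' t' => simp [pvSplit1, hs]
      · have : List.isPrefixOf ['*'] (c :: rest) = false := by
          simp [List.isPrefixOf]; intro hh; exact hc hh.symm
        rw [this]
        simp only [Bool.false_eq_true, if_false]
        rw [ih rest (c :: cur) accs (by simpa using Nat.lt_of_succ_lt_succ h)]
        cases hs : pvSplit1 rest with
        | nil => exact absurd hs (pvSplit1_ne_nil rest)
        | cons h' t' => simp [pvSplit1, hc, hs]

theorem pvSplitOn_eq (cs : List Char) : PySem.Chars.splitOn cs ['*'] = pvSplit1 cs := by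
  rw [PySem.Chars.splitOn, pvGo_spec (cs.length + 1) cs [] [] (by omega)]
  cases hs : pvSplit1 cs with
  | nil => exact absurd hs (pvSplit1_ne_nil cs)
  | cons h t => simp

theorem pvFilterRange {α : Type} : ∀ (xs : List α) (m : Nat), m = (xs.length + 1) / 2 →
    List.filterMap (fun k => xs[2 * k]?) (List.range m) = pvEvens xs
  | [], m, hm => by simp_all [pvEvens]
  | [x], m, hm => by
      simp at hm; subst hm
      simp [List.range_succ, pvEvens, pvOdds]
  | x :: y :: t, m, hm => by
      have ht : m = (t.length + 1) / 2 + 1 := by simp at hm; omega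
      subst ht
      rw [List.range_succ_eq_map]
      simp only [List.filterMap_cons, List.filterMap_map]
      simp only [Function.comp_def]
      have h2 : List.filterMap (fun k => (x :: y :: t)[2 * (k + 1)]?) (List.range ((t.length + 1) / 2))
          = List.filterMap (fun k => t[2 * k]?) (List.range ((t.length + 1) / 2)) := by
        apply List.filterMap_congr
        intro k _
        have : 2 * (k + 1) = 2 * k + 1 + 1 := by omega
        simp [this]
      rw [h2, pvFilterRange t _ rfl]
      simp [pvEvens, pvOdds]

theorem pvSlice2 {α : Type} (xs : List α) :
    PySem.List.slice? xs none none 2 = some (pvEvens xs) := by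
  simp only [PySem.List.slice?, PySem.List.sliceIndices]
  norm_num
  have hc : ((((xs.length : Int) + 2 - 1) / 2)).toNat = (xs.length + 1) / 2 := by omega
  by_cases h0 : 0 < xs.length
  · simp only [h0, if_true, hc]
    have he : (fun (x : Nat) => xs[(2 * (x : Int)).toNat]?) = fun x => xs[2 * x]? := by
      funext x
      congr 1
    rw [he, pvFilterRange xs _ rfl]
  · cases xs with
    | nil => simp [pvEvens]
    | cons a t => simp at h0

theorem pvFoldA (cs : List Char) (out : List Char) (b : Bool) :
    (cs.foldl
      (fun (st : List Char × Bool) ch =>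
        if ch = '*' then (st.1, !st.2)
        else if !st.2 then (st.1 ++ [ch], st.2) else st)
      (out, b)).1 = out ++ pvKeep b cs := by
  induction cs generalizing out b with
  | nil => simp [pvKeep]
  | cons c t ih =>
    simp only [List.foldl, pvKeep]
    split_ifs with h1 h2 <;> cases b <;> simp_all

theorem pvFlattenSplit (cs : List Char) :
    (pvEvens (pvSplit1 cs)).flatten = pvKeep false cs ∧
    (pvOdds (pvSplit1 cs)).flatten = pvKeep true cs := by
  induction cs with
  | nil => simp [pvSplit1, pvEvens, pvOdds, pvKeep]
  | cons c rest ih =>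
    by_cases hc : c = '*'
    · subst hc
      simp only [pvSplit1, if_true, pvEvens, pvOdds, pvKeep]
      cases hs : pvSplit1 rest with
      | nil => exact absurd hs (pvSplit1_ne_nil rest)
      | cons h t =>
        constructor
        · simpa [hs, pvEvens, pvOdds] using ih.2
        · simpa [hs, pvEvens, pvOdds] using ih.1
    · simp only [pvSplit1, hc, if_false]
      cases hs : pvSplit1 rest with
      | nil => exact absurd hs (pvSplit1_ne_nil rest)
      | cons h t =>
        rw [hs] at ih
        constructor
        · simp only [pvEvens, List.flatten_cons, pvKeep, hc, if_false]
          simp only [pvEvens, List.flatten_cons] at ih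
          simp [ih.1]
        · simp only [pvOdds, pvKeep, hc, if_false]
          simp only [pvOdds] at ih
          simp [ih.2]

theorem pvJoinNil (ll : List (List Char)) : PySem.Chars.join [] ll = ll.flatten := by
  simp [PySem.Chars.join, List.intercalate]
  induction ll with
  | nil => simp
  | cons h t ih =>
    cases t with
    | nil => simp
    | cons h' t' => simp_all [List.intersperse]

-- ===== VERDICT (by name: the statement is the Claim_ definition above) =====
theorem pvEvensOdds_map {α β : Type} (f : α → β) (l : List α) :
    pvEvens (l.map f) = (pvEvens l).map f ∧ pvOdds (l.map f) = (pvOdds l).map f := by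
  induction l with
  | nil => simp [pvEvens, pvOdds]
  | cons x t ih => simp [pvEvens, pvOdds, ih.1, ih.2]

theorem sanitize_tts_text_spec : Claim_equal_sanitize_tts_text := by
  intro text _
  unfold Spec_sanitize_tts_text sanitize_tts_text sanitize_tts_text_alt
  by_cases h : text = ""
  · simp [h]
  · simp only [h, if_false]
    rw [show PySem.Str.split? text "*" = some ((pvSplit1 text.toList).map String.ofList) by
      simp [PySem.Str.split?, PySem.Chars.split?, pvSplitOn_eq]]
    simp only [Option.getD_some]
    rw [pvSlice2]
    simp only [Option.getD_some]
    rw [(pvEvensOdds_map String.ofList (pvSplit1 text.toList)).1]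
    apply congrArg PySem.Str.strip
    rw [PySem.Str.join]
    rw [show List.map String.toList (List.map String.ofList (pvEvens (pvSplit1 text.toList)))
          = pvEvens (pvSplit1 text.toList) by
        simp [Function.comp_def]]
    rw [show ("" : String).toList = ([] : List Char) from rfl]
    rw [pvJoinNil, (pvFlattenSplit text.toList).1]
    congr 1
    simpa using pvFoldA text.toList [] false
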